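-- pv_equiv track=rewrite | github.com/ShrohanMohapatra/PackMFCS | dfa.py | dfa_2
-- ===== SOURCE A (Python) =====
-- def dfa_2(string):
--     machine = {
--         0:{'a':2,'b':1},
--         1:{'a':3,'b':0},
--         2:{'a':0,'b':3},
--         3:{'a':1,'b':2}
--     }
--     start = 0
--     final = [1]
--     state = start
--     for elem in string: state = machine[state][elem]
--     if state in final: return True
--     else: return False
-- ===== SOURCE B (Python) =====
-- def dfa_2(string):
--     odd_a = False
--     odd_b = False
--     for elem in string:
--         if elem == 'a':
--             odd_a = not odd_a
--         elif elem == 'b':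
--             odd_b = not odd_b
--         else:
--             raise KeyError(elem)
--     return odd_b and not odd_a
-- ===== Notes on version B (the rewrite author's own statement) =====
-- stated objective: simpler
-- what changed: Replaces the 4-state transition-table dict with two boolean parity flags (odd count of 'a'/'b'), accepting iff the b-parity is odd and the a-parity even.
import Mathlib
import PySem

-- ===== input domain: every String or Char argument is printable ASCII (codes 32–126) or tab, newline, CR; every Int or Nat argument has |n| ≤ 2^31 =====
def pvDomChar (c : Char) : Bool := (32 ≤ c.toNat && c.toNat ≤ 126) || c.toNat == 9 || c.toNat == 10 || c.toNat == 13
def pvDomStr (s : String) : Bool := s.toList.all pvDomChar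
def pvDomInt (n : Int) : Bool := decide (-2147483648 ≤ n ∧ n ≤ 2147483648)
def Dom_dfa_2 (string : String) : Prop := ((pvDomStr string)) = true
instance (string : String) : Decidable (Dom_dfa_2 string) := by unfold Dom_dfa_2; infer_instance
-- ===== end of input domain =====

-- B replaces A's 4-state transition-table dict with two boolean parity flags
-- (odd number of 'a's / 'b's), accepting iff b-parity is odd and a-parity even: simpler, same cost.


-- ===== PORT A =====
-- the transition table `machine` of A
def pvMachine : PySem.Dict Int (PySem.Dict Char Int) :=
  PySem.Dict.ofList
    [(0, PySem.Dict.ofList [('a', 2), ('b', 1)]),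
     (1, PySem.Dict.ofList [('a', 3), ('b', 0)]),
     (2, PySem.Dict.ofList [('a', 0), ('b', 3)]),
     (3, PySem.Dict.ofList [('a', 1), ('b', 2)])]

-- one iteration of A's loop body `state = machine[state][elem]` (none = KeyError)
def pvStepA (st : Option Int) (elem : Char) : Option Int :=
  st.bind fun s => (PySem.Dict.get? pvMachine s).bind fun row => PySem.Dict.get? row elem

def dfa_2 (string : String) : Bool :=
  let start : Int := 0
  let final : List Int := [1]
  let state := string.toList.foldl pvStepA (some start)
  match state with
  | some s => decide (s ∈ final)
  | none => false   -- unreachable under Pre_: Python raises KeyError here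

-- ===== PORT B =====
-- one iteration of B's loop body: toggle the matching parity flag (none = KeyError)
def pvStepB (st : Option (Bool × Bool)) (elem : Char) : Option (Bool × Bool) :=
  st.bind fun p =>
    if elem = 'a' then some (!p.1, p.2)
    else if elem = 'b' then some (p.1, !p.2)
    else none

def dfa_2_alt (string : String) : Bool :=
  match string.toList.foldl pvStepB (some (false, false)) with
  | some (odd_a, odd_b) => odd_b && !odd_a
  | none => false   -- unreachable under Pre_: Python raises KeyError here

-- ===== PRECONDITION & SPEC =====
-- A (and B) raise KeyError on any character other than 'a'/'b'; Pre_ excludes exactly those.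
def pvPreChar (c : Char) : Bool := c == 'a' || c == 'b'
def Pre_dfa_2 (string : String) : Prop := (string.toList.all pvPreChar) = true
instance (string : String) : Decidable (Pre_dfa_2 string) := by unfold Pre_dfa_2; infer_instance
def pvWitness_dfa_2 : String := "b"

def Spec_dfa_2 (string : String) (out : Bool) : Prop := out = dfa_2_alt string
instance (string : String) (out : Bool) : Decidable (Spec_dfa_2 string out) := by unfold Spec_dfa_2; infer_instance

-- ===== CLAIM (what is proved, stated in full; the proofs are below) =====
def Claim_equal_dfa_2 : Prop := ∀ (string : String), Dom_dfa_2 string → Pre_dfa_2 string → Spec_dfa_2 string (dfa_2 string)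

-- ===== LEMMAS AND PROOFS =====

-- encode the two parity flags as A's state number: 0=(ff,ff) 1=(ff,tt) 2=(tt,ff) 3=(tt,tt)
def pvEnc (p : Bool × Bool) : Int :=
  (if p.1 then 2 else 0) + (if p.2 then 1 else 0)

-- the pure parity step, shared shape of both loops on valid characters
def pvPStep (p : Bool × Bool) (c : Char) : Bool × Bool :=
  if c = 'a' then (!p.1, p.2) else (p.1, !p.2)

lemma pvStepA_enc (p : Bool × Bool) (c : Char) (hc : c = 'a' ∨ c = 'b') :
    pvStepA (some (pvEnc p)) c = some (pvEnc (pvPStep p c)) := by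
  rcases p with ⟨oa, ob⟩
  rcases hc with h | h <;> subst h <;> cases oa <;> cases ob <;> decide

lemma pvStepB_some (p : Bool × Bool) (c : Char) (hc : c = 'a' ∨ c = 'b') :
    pvStepB (some p) c = some (pvPStep p c) := by
  rcases hc with h | h <;> subst h <;> simp [pvStepB, pvPStep]

lemma pvFoldA (l : List Char) (p : Bool × Bool) (h : ∀ c ∈ l, c = 'a' ∨ c = 'b') :
    l.foldl pvStepA (some (pvEnc p)) = some (pvEnc (l.foldl pvPStep p)) := by
  induction l generalizing p with
  | nil => rfl
  | cons c tl ih =>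
      have hc := h c (List.mem_cons_self ..)
      simp only [List.foldl_cons, pvStepA_enc p c hc]
      exact ih _ (fun d hd => h d (List.mem_cons_of_mem _ hd))

lemma pvFoldB (l : List Char) (p : Bool × Bool) (h : ∀ c ∈ l, c = 'a' ∨ c = 'b') :
    l.foldl pvStepB (some p) = some (l.foldl pvPStep p) := by
  induction l generalizing p with
  | nil => rfl
  | cons c tl ih =>
      have hc := h c (List.mem_cons_self ..)
      simp only [List.foldl_cons, pvStepB_some p c hc]
      exact ih _ (fun d hd => h d (List.mem_cons_of_mem _ hd))

-- ===== VERDICT (by name: the statement is the Claim_ definition above) =====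
theorem dfa_2_spec : Claim_equal_dfa_2 := by
  intro s _ hpre
  have hpre' : ∀ c ∈ s.toList, c = 'a' ∨ c = 'b' := by
    intro c hc
    have h := List.all_eq_true.mp hpre c hc
    simp only [pvPreChar, Bool.or_eq_true, beq_iff_eq] at h
    exact h
  have hA := pvFoldA s.toList (false, false) hpre'
  have hB := pvFoldB s.toList (false, false) hpre'
  simp only [show pvEnc (false, false) = 0 from rfl] at hA
  simp only [Spec_dfa_2, dfa_2, dfa_2_alt, hA, hB]
  rcases s.toList.foldl pvPStep (false, false) with ⟨oa, ob⟩
  cases oa <;> cases ob <;> decide
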